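-- pv_equiv track=rewrite | github.com/LaurusKuvakei/rrug | rrug_core.py | _helper_generate_clean_layout
-- ===== SOURCE A (Python) =====
-- def _helper_generate_clean_layout(node_names, node_map):
--     # Initialize container for finalized layout rows and a buffer for the current row
--     layout_rows = []
--     current_row_buffer = []
--     # Iterate through each node name to determine row grouping
--     for name in node_names:
--         # Add the current node to the row buffer
--         current_row_buffer.append(name)
--         node = node_map.get(name, {})
--         # Check if the node lacks a JOIN flag, signaling the end of the current row
--         if "JOIN" not in node.get("active_flags", set()):
--             # Commit the buffer to the layout rows and reset the buffer
--             layout_rows.append(current_row_buffer)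
--             current_row_buffer = []
--     # Commit any remaining items in the buffer if the loop terminates without a final commit
--     if current_row_buffer: layout_rows.append(current_row_buffer)
--
--     return layout_rows
-- ===== SOURCE B (Python) =====
-- def _helper_generate_clean_layout(node_names, node_map):
--     # Two-phase decomposition: first collect the indices of row-ending nodes
--     # (those without the JOIN flag), then build the rows by slicing between
--     # consecutive boundaries; a trailing remainder becomes the final row.
--     names = list(node_names)
--     boundaries = [i for i, name in enumerate(names)
--                   if "JOIN" not in node_map.get(name, {}).get("active_flags", set())]
--     rows = []
--     start = 0
--     for b in boundaries:
--         rows.append(names[start:b + 1])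
--         start = b + 1
--     if start < len(names):
--         rows.append(names[start:])
--     return rows
-- ===== Notes on version B (the rewrite author's own statement) =====
-- stated objective: alternative
-- what changed: A is a single forward pass appending into a row buffer committed at each JOIN-less node; B is a two-phase decomposition that first collects the boundary indices of JOIN-less nodes and then slices the name list between consecutive boundaries (plus the trailing remainder).
import Mathlib
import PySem

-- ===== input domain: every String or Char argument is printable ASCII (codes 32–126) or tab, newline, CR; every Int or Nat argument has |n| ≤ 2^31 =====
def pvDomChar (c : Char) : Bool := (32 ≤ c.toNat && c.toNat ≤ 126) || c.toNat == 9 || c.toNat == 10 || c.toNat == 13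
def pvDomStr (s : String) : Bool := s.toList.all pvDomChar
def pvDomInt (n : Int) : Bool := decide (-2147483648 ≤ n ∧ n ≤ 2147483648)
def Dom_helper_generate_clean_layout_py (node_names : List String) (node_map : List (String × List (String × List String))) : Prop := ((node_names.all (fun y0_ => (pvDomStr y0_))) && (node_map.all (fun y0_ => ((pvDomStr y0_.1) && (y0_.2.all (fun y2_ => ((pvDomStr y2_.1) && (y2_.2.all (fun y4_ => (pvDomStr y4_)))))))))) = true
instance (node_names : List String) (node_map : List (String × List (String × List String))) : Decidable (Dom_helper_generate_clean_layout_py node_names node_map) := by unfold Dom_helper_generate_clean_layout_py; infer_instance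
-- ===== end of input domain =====

-- B replaces A's incremental buffer-and-commit loop by a two-phase decomposition:
-- collect the boundary indices of JOIN-less nodes, then slice the name list
-- between consecutive boundaries (objective: alternative; same O(n) cost).

-- ===== PORT A =====
-- dict.get(name, {}) / .get("active_flags", set()): first-match association-list
-- lookup with default (exact for Python dict lookup under the type convention).
def pvEndsRow (node_map : List (String × List (String × List String))) (name : String) : Bool :=
  !((((node_map.lookup name).getD []).lookup "active_flags").getD []).contains "JOIN"

def helper_generate_clean_layout_py (node_names : List String) (node_map : List (String × List (String × List String))) : List (List String) :=
  let st := node_names.foldl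
    (fun (st : List (List String) × List String) name =>
      let buf := st.2 ++ [name]
      if pvEndsRow node_map name then (st.1 ++ [buf], []) else (st.1, buf))
    ([], [])
  if st.2.isEmpty then st.1 else st.1 ++ [st.2]

-- ===== PORT B =====
-- enumerate(names) → List.zipIdx; the slice names[start:b+1] is ported as
-- (names.drop start).take (b+1-start), exact for the in-range nonnegative
-- indices B uses (0 ≤ start ≤ b+1 ≤ len(names)); names[start:] → names.drop start.
def helper_generate_clean_layout_py_alt (node_names : List String) (node_map : List (String × List (String × List String))) : List (List String) :=
  let boundaries := (node_names.zipIdx).filterMap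
    (fun p => if pvEndsRow node_map p.1 then some p.2 else none)
  let st := boundaries.foldl
    (fun (st : List (List String) × Nat) b =>
      (st.1 ++ [(node_names.drop st.2).take (b + 1 - st.2)], b + 1))
    ([], 0)
  if st.2 < node_names.length then st.1 ++ [node_names.drop st.2] else st.1

-- ===== PRECONDITION & SPEC =====
def Spec_helper_generate_clean_layout_py (node_names : List String) (node_map : List (String × List (String × List String))) (out : List (List String)) : Prop := out = helper_generate_clean_layout_py_alt node_names node_map
instance (node_names : List String) (node_map : List (String × List (String × List String))) (out : List (List String)) : Decidable (Spec_helper_generate_clean_layout_py node_names node_map out) := by unfold Spec_helper_generate_clean_layout_py; infer_instance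

-- ===== CLAIM (what is proved, stated in full; the proofs are below) =====
def Claim_equal_helper_generate_clean_layout_py : Prop := ∀ (node_names : List String) (node_map : List (String × List (String × List String))), Dom_helper_generate_clean_layout_py node_names node_map → Spec_helper_generate_clean_layout_py node_names node_map (helper_generate_clean_layout_py node_names node_map)

-- ===== LEMMAS AND PROOFS =====

-- consHead x gs prepends x to the first group of gs (a fresh group if gs = []).
def consHead (x : String) : List (List String) → List (List String)
  | [] => [[x]]
  | g :: gs => (x :: g) :: gs

-- specApp f l b: the rows of l, with the residual buffer b glued after l's trailing run.
def specApp (f : String → Bool) : List String → List String → List (List String)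
  | [], b => if b.isEmpty then [] else [b]
  | x :: xs, b => if f x then [x] :: specApp f xs b else consHead x (specApp f xs b)

def attach (b : List String) : List (List String) → List (List String)
  | [] => if b.isEmpty then [] else [b]
  | g :: gs => (b ++ g) :: gs

theorem attach_nil (s : List (List String)) : attach [] s = s := by
  cases s <;> simp [attach]

theorem attach_consHead (b : List String) (x : String) (gs : List (List String)) :
    attach b (consHead x gs) = attach (b ++ [x]) gs := by
  cases gs <;> simp [attach, consHead]

theorem foldA_eq (node_map : List (String × List (String × List String)))
    (l : List String) (r : List (List String)) (b : List String) :
    (let st := l.foldl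
        (fun (st : List (List String) × List String) name =>
          let buf := st.2 ++ [name]
          if pvEndsRow node_map name then (st.1 ++ [buf], []) else (st.1, buf))
        (r, b)
      if st.2.isEmpty then st.1 else st.1 ++ [st.2])
      = r ++ attach b (specApp (pvEndsRow node_map) l []) := by
  induction l generalizing r b with
  | nil =>
    simp only [List.foldl_nil, specApp, attach]
    cases b <;> simp
  | cons x xs ih =>
    simp only [List.foldl_cons, specApp]
    by_cases h : pvEndsRow node_map x
    · simp only [h, if_pos, ih]
      rw [attach_nil]
      cases b <;> simp [attach]
    · simp only [h, if_neg, Bool.false_eq_true, not_false_iff, ih]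
      cases hs : specApp (pvEndsRow node_map) xs [] with
      | nil => simp [attach, consHead]
      | cons g gs => simp [attach, consHead]

theorem take_succ_of_drop (full : List String) (s k : Nat) (x : String) (ys : List String)
    (hsk : s ≤ k) (h : full.drop k = x :: ys) :
    (full.drop s).take (k + 1 - s) = (full.drop s).take (k - s) ++ [x] := by
  have hk1 : k + 1 - s = (k - s) + 1 := by omega
  have hget : (full.drop s)[k - s]? = some x := by
    rw [List.getElem?_drop]
    have : s + (k - s) = k := by omega
    rw [this, ← List.head?_drop, h]
    rfl
  rw [hk1, List.take_add_one, hget]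
  rfl

theorem foldB_core (node_map : List (String × List (String × List String)))
    (full : List String) (ys : List String) :
    ∀ (k s : Nat) (r : List (List String)), s ≤ k → full.drop k = ys →
    (let st := ((ys.zipIdx k).filterMap
        (fun p => if pvEndsRow node_map p.1 then some p.2 else none)).foldl
        (fun (st : List (List String) × Nat) b =>
          (st.1 ++ [(full.drop st.2).take (b + 1 - st.2)], b + 1))
        (r, s)
      if st.2 < full.length then st.1 ++ [full.drop st.2] else st.1)
      = r ++ attach ((full.drop s).take (k - s)) (specApp (pvEndsRow node_map) ys []) := by
  induction ys with
  | nil =>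
    intro k s r hsk h
    have hlen : full.length ≤ k := by
      have := congrArg List.length h
      simp at this; omega
    have htake : (full.drop s).take (k - s) = full.drop s :=
      List.take_of_length_le (by rw [List.length_drop]; omega)
    simp only [List.zipIdx_nil, List.filterMap_nil, List.foldl_nil, specApp, attach, htake]
    by_cases hs : s < full.length
    · have hne : (full.drop s).isEmpty = false := by
        simp only [List.isEmpty_eq_false_iff, ne_eq, List.drop_eq_nil_iff, not_le]; omega
      simp [hs, hne]
    · have hne : (full.drop s).isEmpty = true := by
        simp only [List.isEmpty_iff, List.drop_eq_nil_iff]; omega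
      simp [hs, hne]
  | cons x ys ih =>
    intro k s r hsk h
    have hdrop1 : full.drop (k + 1) = ys := by
      have h2 : (full.drop k).drop 1 = ys := by simp [h]
      simpa [List.drop_drop, Nat.add_comm] using h2
    simp only [List.zipIdx_cons, List.filterMap_cons, specApp]
    by_cases hx : pvEndsRow node_map x
    · simp only [hx, if_pos, List.foldl_cons]
      rw [ih (k+1) (k+1) _ (le_refl _) hdrop1]
      simp only [Nat.sub_self, List.take_zero, attach_nil]
      rw [take_succ_of_drop full s k x ys hsk h]
      cases specApp (pvEndsRow node_map) ys [] <;> simp [attach]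
    · simp only [hx, Bool.false_eq_true, if_neg, not_false_iff]
      rw [ih (k+1) s _ (by omega) hdrop1,
        take_succ_of_drop full s k x ys hsk h, attach_consHead]

-- ===== VERDICT (by name: the statement is the Claim_ definition above) =====
theorem helper_generate_clean_layout_py_spec : Claim_equal_helper_generate_clean_layout_py := by
  intro node_names node_map _
  unfold Spec_helper_generate_clean_layout_py helper_generate_clean_layout_py helper_generate_clean_layout_py_alt
  rw [foldA_eq]
  have := foldB_core node_map node_names node_names 0 0 [] (le_refl _) (by simp)
  simp only [List.take_zero, Nat.sub_self, List.drop_zero] at this ⊢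
  rw [this, attach_nil]
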